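-- pv_equiv track=rewrite | github.com/IzmailovES/euler_project | problem816.py | generate
-- ===== SOURCE A (Python) =====
-- def get_next(num):
--     return pow(num,2,50515093)
--
-- def generate(num):
--     ret = []
--     start = 290797
--     while num:
--         d = get_next(start)
--         ret.append((start, d))
--         start = get_next(d)
--         num -= 1
--     return ret
-- ===== SOURCE B (Python) =====
-- def generate(num):
--     # Generate the flat sequence v, v^2 mod m, ... (2*num terms), then pair
--     # adjacent terms via zip over a single iterator.
--     v = 290797
--     vals = []
--     for _ in range(2 * num):
--         vals.append(v)
--         v = pow(v, 2, 50515093)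
--     it = iter(vals)
--     return list(zip(it, it))
-- ===== Notes on version B (the rewrite author's own statement) =====
-- stated objective: alternative
-- what changed: B generates one flat list of 2*num successive terms of the single squaring recurrence with a for-range loop and then pairs adjacent terms with zip over one iterator, instead of A's while-countdown loop that computes two recurrence steps per iteration and appends pairs directly; Pre_ excludes num < 0, where A's while loop never terminates (B returns []).
import Mathlib
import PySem

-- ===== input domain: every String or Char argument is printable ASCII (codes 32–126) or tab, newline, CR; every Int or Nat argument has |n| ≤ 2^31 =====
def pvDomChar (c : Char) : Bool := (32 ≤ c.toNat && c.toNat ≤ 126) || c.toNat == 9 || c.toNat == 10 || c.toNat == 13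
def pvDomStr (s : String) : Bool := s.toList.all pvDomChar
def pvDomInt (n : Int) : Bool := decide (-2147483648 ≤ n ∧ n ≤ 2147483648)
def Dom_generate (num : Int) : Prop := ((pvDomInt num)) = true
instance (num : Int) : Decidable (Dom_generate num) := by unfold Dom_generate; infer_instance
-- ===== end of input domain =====

-- B builds one flat list of 2*num recurrence terms and pairs adjacent terms via zip
-- over a single iterator, instead of A's while-countdown doing two steps per iteration.

-- ===== PORT A =====
def getNext (num : Int) : Int := PySem.Int.mod (num * num) 50515093

-- A's 'while num: … ; num -= 1' loop: for num ≥ 0 it runs num times (num.toNat);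
-- for num < 0 Python diverges, which Pre_generate excludes.
def generateLoop : Nat → Int → List (Int × Int) → List (Int × Int)
  | 0, _, ret => ret
  | n + 1, start, ret =>
      let d := getNext start
      generateLoop n (getNext d) (ret ++ [(start, d)])

def generate (num : Int) : List (Int × Int) :=
  generateLoop num.toNat 290797 []

-- ===== PORT B =====
-- the 'for _ in range(2*num)' loop of Source B, collecting successive terms
def flatLoop : Nat → Int → List Int → List Int
  | 0, _, vals => vals
  | k + 1, v, vals => flatLoop k (PySem.Int.mod (v * v) 50515093) (vals ++ [v])

-- list(zip(it, it)) on one iterator: pair adjacent elements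
def pairUp : List Int → List (Int × Int)
  | a :: b :: rest => (a, b) :: pairUp rest
  | _ => []

def generate_alt (num : Int) : List (Int × Int) :=
  pairUp (flatLoop (2 * num).toNat 290797 [])

-- ===== PRECONDITION & SPEC =====
-- Pre_ excludes num < 0: A's 'while num' loop decrements past zero and never terminates there.
def Pre_generate (num : Int) : Prop := 0 ≤ num
instance (num : Int) : Decidable (Pre_generate num) := by unfold Pre_generate; infer_instance
def pvWitness_generate : Int := (3)

def Spec_generate (num : Int) (out : List (Int × Int)) : Prop := out = generate_alt num
instance (num : Int) (out : List (Int × Int)) : Decidable (Spec_generate num out) := by unfold Spec_generate; infer_instance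

-- ===== CLAIM (what is proved, stated in full; the proofs are below) =====
def Claim_equal_generate : Prop := ∀ (num : Int), Dom_generate num → Pre_generate num → Spec_generate num (generate num)

-- ===== LEMMAS AND PROOFS =====

-- the flat sequence of n recurrence terms starting at v, built front-first
def flatSpec : Nat → Int → List Int
  | 0, _ => []
  | k + 1, v => v :: flatSpec k (getNext v)

theorem flatLoop_eq (n : Nat) : ∀ (v : Int) (acc : List Int),
    flatLoop n v acc = acc ++ flatSpec n v := by
  induction n with
  | zero => intro v acc; simp [flatLoop, flatSpec]
  | succ k ih =>
      intro v acc
      simp [flatLoop, flatSpec, ih, getNext]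

theorem generateLoop_eq (n : Nat) : ∀ (start : Int) (acc : List (Int × Int)),
    generateLoop n start acc = acc ++ pairUp (flatSpec (2 * n) start) := by
  induction n with
  | zero => intro s acc; simp [generateLoop, flatSpec, pairUp]
  | succ k ih =>
      intro s acc
      have h2 : 2 * (k + 1) = (2 * k) + 1 + 1 := by omega
      rw [h2]
      simp only [generateLoop, flatSpec, pairUp, ih]
      simp

-- ===== VERDICT (by name: the statement is the Claim_ definition above) =====
theorem generate_spec : Claim_equal_generate := by
  unfold Claim_equal_generate
  intro num _ hpre
  unfold Spec_generate generate generate_alt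
  rw [flatLoop_eq, generateLoop_eq]
  have : (2 * num).toNat = 2 * num.toNat := by omega
  simp [this]
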